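-- pv_equiv track=rewrite | github.com/rodrigueswilson/lesson-plan-browser | backend/llm_service.py | _identify_day_at_position
-- ===== SOURCE A (Python) =====
-- from typing import Any, Callable, Dict, List, Optional, Tuple
--
-- def _identify_day_at_position(
--     json_string: str, position: int
-- ) -> Optional[str]:
--     """Find which day is being generated at the given position"""
--     # Look backwards from position for day keys
--     text_before = json_string[:position]
--     # Find the last day key before the position
--     day_patterns = [
--         ('"monday":', "monday"),
--         ('"tuesday":', "tuesday"),
--         ('"wednesday":', "wednesday"),
--         ('"thursday":', "thursday"),
--         ('"friday":', "friday"),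
--     ]
--     last_day = None
--     last_pos = -1
--     for pattern, day_name in day_patterns:
--         pos = text_before.rfind(pattern)
--         if pos > last_pos:
--             last_pos = pos
--             last_day = day_name
--     return last_day
-- ===== SOURCE B (Python) =====
-- from typing import Optional
--
-- _DAYS = ("monday", "tuesday", "wednesday", "thursday", "friday")
--
-- def _identify_day_at_position(
--     json_string: str, position: int
-- ) -> Optional[str]:
--     """Find which day is being generated at the given position"""
--     text = json_string[:position]
--     # single backward scan: the first day key found is the rightmost one
--     for i in range(len(text), -1, -1):
--         for day in _DAYS:
--             if text.startswith('"' + day + '":', i):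
--                 return day
--     return None
-- ===== Notes on version B (the rewrite author's own statement) =====
-- stated objective: simpler
-- what changed: Replaces the five separate rfind passes plus running-argmax bookkeeping by one backward scan over positions that returns the first (i.e. rightmost) day key it finds.
import Mathlib
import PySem

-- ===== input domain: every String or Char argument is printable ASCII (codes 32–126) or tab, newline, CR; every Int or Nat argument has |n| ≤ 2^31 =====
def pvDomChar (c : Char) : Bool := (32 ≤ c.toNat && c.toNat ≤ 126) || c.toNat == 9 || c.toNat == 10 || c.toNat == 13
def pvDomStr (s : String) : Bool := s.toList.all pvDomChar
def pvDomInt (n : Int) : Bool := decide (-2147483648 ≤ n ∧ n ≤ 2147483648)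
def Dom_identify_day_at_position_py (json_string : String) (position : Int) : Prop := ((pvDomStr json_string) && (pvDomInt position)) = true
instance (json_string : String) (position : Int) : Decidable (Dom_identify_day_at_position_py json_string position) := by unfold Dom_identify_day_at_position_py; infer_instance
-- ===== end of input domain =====

-- B replaces A's five rfind passes (+ running argmax) by one backward scan that returns the
-- first (= rightmost) day key found; objective: simpler. Return value only, no side effects.

-- ===== PORT A =====
-- day_patterns, as in A
def pvDayPatterns : List (String × String) :=
  [("\"monday\":", "monday"), ("\"tuesday\":", "tuesday"), ("\"wednesday\":", "wednesday"),
   ("\"thursday\":", "thursday"), ("\"friday\":", "friday")]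

def identify_day_at_position_py (json_string : String) (position : Int) : Option String :=
  -- text_before = json_string[:position]
  let text_before := PySem.Str.slice json_string none (some position)
  -- for pattern, day_name in day_patterns: pos = text_before.rfind(pattern); if pos > last_pos: …
  let r := pvDayPatterns.foldl
    (fun (acc : Option String × Int) pd =>
      let pos := PySem.Str.rfind text_before pd.1
      if pos > acc.2 then (some pd.2, pos) else acc)
    (none, -1)   -- (last_day, last_pos)
  r.1

-- ===== PORT B =====
def pvDays : List String := ["monday", "tuesday", "wednesday", "thursday", "friday"]

def identify_day_at_position_py_alt (json_string : String) (position : Int) : Option String :=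
  let text := (PySem.Str.slice json_string none (some position)).toList
  -- for i in range(len(text), -1, -1): ported as (List.range (len+1)).reverse = [len, …, 0] (exact)
  (List.range (text.length + 1)).reverse.findSome? fun i =>
    -- for day in _DAYS: if text.startswith('"' + day + '":', i): return day
    -- startswith(p, i) for 0 ≤ i ≤ len(text) is exactly: p is a prefix of text[i:]
    pvDays.findSome? fun day =>
      if (("\"" ++ day ++ "\":").toList).isPrefixOf (text.drop i) then some day else none

-- ===== PRECONDITION & SPEC =====
def Spec_identify_day_at_position_py (json_string : String) (position : Int) (out : Option String) : Prop := out = identify_day_at_position_py_alt json_string position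
instance (json_string : String) (position : Int) (out : Option String) : Decidable (Spec_identify_day_at_position_py json_string position out) := by unfold Spec_identify_day_at_position_py; infer_instance

-- ===== CLAIM (what is proved, stated in full; the proofs are below) =====
def Claim_equal_identify_day_at_position_py : Prop := ∀ (json_string : String) (position : Int), Dom_identify_day_at_position_py json_string position → Spec_identify_day_at_position_py json_string position (identify_day_at_position_py json_string position)

-- ===== LEMMAS AND PROOFS =====

-- -1 for a missed find, the index otherwise (the Int value of a per-pattern rfind)
def pvE (o : Option Nat) : Int := o.elim (-1) (fun n => (n : Int))

theorem pvE_some (n : Nat) : pvE (some n) = (n : Int) := rfl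

theorem pvE_lt {x : Nat} {L : List Nat} (p : Nat → Bool)
    (h : ∀ y ∈ L, y < x) : pvE (L.find? p) < (x : Int) := by
  cases hf : L.find? p with
  | none => simp [pvE]; omega
  | some m =>
    have := List.mem_of_find?_eq_some hf
    simp only [pvE, Option.elim]
    exact_mod_cast h m this

-- rfind is the greatest matching index in [0, j], i.e. find? over the descending index list
theorem pv_rfind_go_eq (s sub : List Char) (j : Nat) :
    PySem.Chars.rfind.go s sub j
      = pvE (((List.range (j + 1)).reverse).find? (fun i => sub.isPrefixOf (s.drop i))) := by
  induction j with
  | zero => simp [PySem.Chars.rfind.go, List.range_succ]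
            split <;> simp_all [pvE]
  | succ j ih =>
    rw [show j + 1 + 1 = (j + 1) + 1 from rfl, List.range_succ, List.reverse_append]
    simp only [List.reverse_singleton, List.singleton_append, List.find?_cons]
    rw [PySem.Chars.rfind.go]
    cases h : sub.isPrefixOf (s.drop (j + 1)) <;> simp [ih, pvE]

theorem pv_rfind_eq (s sub : List Char) :
    PySem.Chars.rfind s sub
      = pvE (((List.range (s.length + 1)).reverse).find? (fun i => sub.isPrefixOf (s.drop i))) := by
  rw [PySem.Chars.rfind, pv_rfind_go_eq]

-- two incomparable patterns cannot both match at the same position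
theorem pv_disjoint {p q s : List Char} (h1 : ¬ p <+: q) (h2 : ¬ q <+: p)
    (hp : p.isPrefixOf s = true) : q.isPrefixOf s = false := by
  by_contra h
  rw [List.isPrefixOf_iff_prefix] at hp
  have hq : q <+: s := by
    rw [← List.isPrefixOf_iff_prefix]; revert h; cases q.isPrefixOf s <;> simp
  rcases List.prefix_or_prefix_of_prefix hp hq with h' | h' <;> [exact h1 h'; exact h2 h']

-- THE CORE: A's argmax-of-rfinds fold equals B's backward first-match scan, for any
-- strictly descending position list L and pairwise-disjoint match predicates p1…p5.
set_option maxHeartbeats 2000000 in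
theorem pv_core (d1 d2 d3 d4 d5 : String) (p1 p2 p3 p4 p5 : Nat → Bool)
    (hd : ∀ i, (p1 i → p2 i = false ∧ p3 i = false ∧ p4 i = false ∧ p5 i = false)
             ∧ (p2 i → p3 i = false ∧ p4 i = false ∧ p5 i = false)
             ∧ (p3 i → p4 i = false ∧ p5 i = false)
             ∧ (p4 i → p5 i = false)) :
    ∀ L : List Nat, L.Pairwise (· > ·) →
    (([(p1, d1), (p2, d2), (p3, d3), (p4, d4), (p5, d5)].foldl
        (fun (acc : Option String × Int) pd =>
          let pos := pvE (L.find? pd.1)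
          if pos > acc.2 then (some pd.2, pos) else acc)
        (none, -1)).1 : Option String)
      = L.findSome? (fun i =>
          if p1 i then some d1 else if p2 i then some d2 else if p3 i then some d3
          else if p4 i then some d4 else if p5 i then some d5 else none) := by
  intro L hL
  induction L with
  | nil => simp [pvE]
  | cons x L ih =>
    have hlt : ∀ y ∈ L, y < x := fun y hy => (List.pairwise_cons.mp hL).1 y hy
    have hL' := (List.pairwise_cons.mp hL).2
    have e1 := pvE_lt (x := x) (L := L) p1 hlt
    have e2 := pvE_lt (x := x) (L := L) p2 hlt
    have e3 := pvE_lt (x := x) (L := L) p3 hlt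
    have e4 := pvE_lt (x := x) (L := L) p4 hlt
    have e5 := pvE_lt (x := x) (L := L) p5 hlt
    rcases Bool.eq_false_or_eq_true (p1 x) with h1 | h1
    · -- pattern 1 matches at x (so the later, disjoint patterns do not)
      obtain ⟨q2, q3, q4, q5⟩ := (hd x).1 h1
      simp only [List.foldl_cons, List.foldl_nil, List.findSome?_cons, List.find?_cons,
        h1, q2, q3, q4, q5, pvE_some, reduceIte]
      clear ih hd hlt hL' h1 q2 q3 q4 q5
      generalize pvE (List.find? p2 L) = v2 at e2 ⊢
      generalize pvE (List.find? p3 L) = v3 at e3 ⊢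
      generalize pvE (List.find? p4 L) = v4 at e4 ⊢
      generalize pvE (List.find? p5 L) = v5 at e5 ⊢
      split_ifs <;> first | rfl | omega
    · -- no match for pattern 1 at x
      rcases Bool.eq_false_or_eq_true (p2 x) with h2 | h2
      · -- pattern 2 matches at x (so the later, disjoint patterns do not)
        obtain ⟨q3, q4, q5⟩ := (hd x).2.1 h2
        simp only [List.foldl_cons, List.foldl_nil, List.findSome?_cons, List.find?_cons,
          h1, h2, q3, q4, q5, pvE_some, reduceIte]
        clear ih hd hlt hL' h1 h2 q3 q4 q5
        generalize pvE (List.find? p1 L) = v1 at e1 ⊢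
        generalize pvE (List.find? p3 L) = v3 at e3 ⊢
        generalize pvE (List.find? p4 L) = v4 at e4 ⊢
        generalize pvE (List.find? p5 L) = v5 at e5 ⊢
        split_ifs <;> first | rfl | omega | (simp_all; try omega)
      · -- no match for pattern 2 at x
        rcases Bool.eq_false_or_eq_true (p3 x) with h3 | h3
        · -- pattern 3 matches at x (so the later, disjoint patterns do not)
          obtain ⟨q4, q5⟩ := (hd x).2.2.1 h3
          simp only [List.foldl_cons, List.foldl_nil, List.findSome?_cons, List.find?_cons,
            h1, h2, h3, q4, q5, pvE_some, reduceIte]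
          clear ih hd hlt hL' h1 h2 h3 q4 q5
          generalize pvE (List.find? p1 L) = v1 at e1 ⊢
          generalize pvE (List.find? p2 L) = v2 at e2 ⊢
          generalize pvE (List.find? p4 L) = v4 at e4 ⊢
          generalize pvE (List.find? p5 L) = v5 at e5 ⊢
          split_ifs <;> first | rfl | omega | (simp_all; try omega)
        · -- no match for pattern 3 at x
          rcases Bool.eq_false_or_eq_true (p4 x) with h4 | h4
          · -- pattern 4 matches at x (so the later, disjoint patterns do not)
            obtain q5 := (hd x).2.2.2 h4
            simp only [List.foldl_cons, List.foldl_nil, List.findSome?_cons, List.find?_cons,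
              h1, h2, h3, h4, q5, pvE_some, reduceIte]
            clear ih hd hlt hL' h1 h2 h3 h4 q5
            generalize pvE (List.find? p1 L) = v1 at e1 ⊢
            generalize pvE (List.find? p2 L) = v2 at e2 ⊢
            generalize pvE (List.find? p3 L) = v3 at e3 ⊢
            generalize pvE (List.find? p5 L) = v5 at e5 ⊢
            split_ifs <;> first | rfl | omega | (simp_all; try omega)
          · -- no match for pattern 4 at x
            rcases Bool.eq_false_or_eq_true (p5 x) with h5 | h5
            · -- pattern 5 matches at x (so the later, disjoint patterns do not)
              simp only [List.foldl_cons, List.foldl_nil, List.findSome?_cons, List.find?_cons,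
                h1, h2, h3, h4, h5, pvE_some, reduceIte]
              clear ih hd hlt hL' h1 h2 h3 h4 h5
              generalize pvE (List.find? p1 L) = v1 at e1 ⊢
              generalize pvE (List.find? p2 L) = v2 at e2 ⊢
              generalize pvE (List.find? p3 L) = v3 at e3 ⊢
              generalize pvE (List.find? p4 L) = v4 at e4 ⊢
              split_ifs <;> first | rfl | omega | (simp_all; try omega)
            · -- no pattern matches at x: both sides step to L
              have := ih hL'
              simp only [List.foldl_cons, List.foldl_nil] at this
              simp only [List.foldl_cons, List.foldl_nil, List.findSome?_cons, List.find?_cons,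
                h1, h2, h3, h4, h5]
              exact this

-- ===== VERDICT (by name: the statement is the Claim_ definition above) =====
set_option maxHeartbeats 4000000 in
theorem identify_day_at_position_py_spec : Claim_equal_identify_day_at_position_py := by
  intro json_string position _
  unfold Spec_identify_day_at_position_py identify_day_at_position_py identify_day_at_position_py_alt
  set t : List Char := (PySem.Str.slice json_string none (some position)).toList with ht
  set L : List Nat := (List.range (t.length + 1)).reverse with hLdef
  -- the five match-at-position predicates
  set p1 : Nat → Bool := fun i => ("\"monday\":".toList).isPrefixOf (t.drop i) with hp1
  set p2 : Nat → Bool := fun i => ("\"tuesday\":".toList).isPrefixOf (t.drop i) with hp2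
  set p3 : Nat → Bool := fun i => ("\"wednesday\":".toList).isPrefixOf (t.drop i) with hp3
  set p4 : Nat → Bool := fun i => ("\"thursday\":".toList).isPrefixOf (t.drop i) with hp4
  set p5 : Nat → Bool := fun i => ("\"friday\":".toList).isPrefixOf (t.drop i) with hp5
  have hd : ∀ i, (p1 i → p2 i = false ∧ p3 i = false ∧ p4 i = false ∧ p5 i = false)
             ∧ (p2 i → p3 i = false ∧ p4 i = false ∧ p5 i = false)
             ∧ (p3 i → p4 i = false ∧ p5 i = false)
             ∧ (p4 i → p5 i = false) := by
    intro i
    refine ⟨fun h => ⟨?_, ?_, ?_, ?_⟩, fun h => ⟨?_, ?_, ?_⟩, fun h => ⟨?_, ?_⟩, fun h => ?_⟩ <;>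
      exact pv_disjoint (by decide) (by decide) h
  have hpair : L.Pairwise (· > ·) :=
    List.pairwise_reverse.mpr (by simpa using List.pairwise_lt_range)
  have main := pv_core "monday" "tuesday" "wednesday" "thursday" "friday" p1 p2 p3 p4 p5 hd L hpair
  -- A side: each rfind is the find? over the descending index list
  have r1 : PySem.Str.rfind (PySem.Str.slice json_string none (some position)) "\"monday\":"
      = pvE (L.find? p1) := pv_rfind_eq t _
  have r2 : PySem.Str.rfind (PySem.Str.slice json_string none (some position)) "\"tuesday\":"
      = pvE (L.find? p2) := pv_rfind_eq t _
  have r3 : PySem.Str.rfind (PySem.Str.slice json_string none (some position)) "\"wednesday\":"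
      = pvE (L.find? p3) := pv_rfind_eq t _
  have r4 : PySem.Str.rfind (PySem.Str.slice json_string none (some position)) "\"thursday\":"
      = pvE (L.find? p4) := pv_rfind_eq t _
  have r5 : PySem.Str.rfind (PySem.Str.slice json_string none (some position)) "\"friday\":"
      = pvE (L.find? p5) := pv_rfind_eq t _
  -- B side: the inner loop over the five days is the five-way if chain
  have inner : ∀ i : Nat,
      (pvDays.findSome? fun day =>
        if (("\"" ++ day ++ "\":").toList).isPrefixOf (t.drop i) then some day else none)
      = (if p1 i then some "monday" else if p2 i then some "tuesday" else
         if p3 i then some "wednesday" else if p4 i then some "thursday" else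
         if p5 i then some "friday" else none) := by
    intro i
    simp only [pvDays, List.findSome?_cons, List.findSome?_nil,
      show ("\"" ++ "monday" ++ "\":" : String) = "\"monday\":" from rfl,
      show ("\"" ++ "tuesday" ++ "\":" : String) = "\"tuesday\":" from rfl,
      show ("\"" ++ "wednesday" ++ "\":" : String) = "\"wednesday\":" from rfl,
      show ("\"" ++ "thursday" ++ "\":" : String) = "\"thursday\":" from rfl,
      show ("\"" ++ "friday" ++ "\":" : String) = "\"friday\":" from rfl]
    split_ifs <;> rfl
  simp only [pvDayPatterns, List.foldl_cons, List.foldl_nil, r1, r2, r3, r4, r5, inner]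
  simp only [List.foldl_cons, List.foldl_nil] at main
  exact main
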